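-- pv_equiv track=rewrite | github.com/abdullahsumbal/CapitalOne-Coding | old_code/helper.py | count_block_comment_from_single_comments
-- ===== SOURCE A (Python) =====
-- def count_block_comment_from_single_comments(line_num_single_comments):
--
--     if len(line_num_single_comments) > 0:
--         previous_number = line_num_single_comments[0]
--     consecutive_comments = 1
--
--     block_comments = 0
--     single_comments = 0
--     for num in line_num_single_comments[1:]:
--         if num - previous_number == 1:
--             consecutive_comments += 1
--
--         # reset consecutive comment counter
--         elif consecutive_comments > 1:
--             consecutive_comments = 1
--             block_comments += 1
--         else:
--             single_comments += 1
--         previous_number = num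
--
--     if consecutive_comments > 1:
--         block_comments += 1
--     else:
--         single_comments += 1
--
--     return block_comments, single_comments
-- ===== SOURCE B (Python) =====
-- def count_block_comment_from_single_comments(line_num_single_comments):
--     xs = line_num_single_comments
--     if not xs:
--         return 0, 0
--     # True marks a break between two maximal runs of consecutive line numbers
--     gaps = [b - a != 1 for a, b in zip(xs, xs[1:])]
--     starts = [True] + gaps          # element i starts a run
--     ends = gaps + [True]            # element i ends a run
--     single_comments = sum(1 for s, e in zip(starts, ends) if s and e)
--     block_comments = 1 + sum(gaps) - single_comments
--     return block_comments, single_comments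
-- ===== Notes on version B (the rewrite author's own statement) =====
-- stated objective: alternative
-- what changed: Replaced A's stateful one-pass run-tracking machine (previous_number/consecutive_comments counters with a trailing flush) by a declarative boundary computation: mark run breaks via pairwise gaps, count singles as elements that both start and end a run, and derive blocks as total runs minus singles.
-- intended difference: On the empty list A reports one single comment and zero block comments, a phantom count for input with no comment lines; B reports zero of each, the intended counts. — e.g. on count_block_comment_from_single_comments([]): A returns (0, 1), B returns (0, 0)
import Mathlib
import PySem

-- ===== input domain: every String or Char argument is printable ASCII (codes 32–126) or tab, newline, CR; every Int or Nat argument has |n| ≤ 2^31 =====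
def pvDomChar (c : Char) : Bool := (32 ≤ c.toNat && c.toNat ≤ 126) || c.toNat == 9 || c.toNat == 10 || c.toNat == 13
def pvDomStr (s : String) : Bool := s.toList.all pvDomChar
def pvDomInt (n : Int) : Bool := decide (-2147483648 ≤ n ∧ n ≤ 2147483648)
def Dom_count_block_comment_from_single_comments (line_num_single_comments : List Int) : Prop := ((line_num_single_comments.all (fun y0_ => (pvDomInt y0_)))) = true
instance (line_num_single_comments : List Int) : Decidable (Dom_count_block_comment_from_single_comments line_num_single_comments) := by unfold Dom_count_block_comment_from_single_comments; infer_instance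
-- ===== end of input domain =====

-- B replaces A's stateful run-tracking loop by a declarative gap/boundary computation (same cost, different decomposition);
-- on the empty list A reports one phantom single comment while B reports zero of each, the intended counts — see D_ below.

-- ===== PORT A =====
-- the loop body of A, transliterated: state is (previous_number, consecutive_comments, block_comments, single_comments)
def pyLoopStep (st : Int × Int × Int × Int) (num : Int) : Int × Int × Int × Int :=
  if num - st.1 = 1 then (num, st.2.1 + 1, st.2.2.1, st.2.2.2)
  else if st.2.1 > 1 then (num, 1, st.2.2.1 + 1, st.2.2.2)
  else (num, st.2.1, st.2.2.1, st.2.2.2 + 1)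

def count_block_comment_from_single_comments (line_num_single_comments : List Int) : Int × Int :=
  -- previous_number is assigned only when the list is nonempty; when empty the loop never reads it,
  -- so the default 0 is never used
  let previous_number := line_num_single_comments.headD 0
  -- for num in line_num_single_comments[1:]: …   (xs[1:] = drop 1, exact)
  let st := (line_num_single_comments.drop 1).foldl pyLoopStep (previous_number, 1, 0, 0)
  if st.2.1 > 1 then (st.2.2.1 + 1, st.2.2.2) else (st.2.2.1, st.2.2.2 + 1)

-- ===== PORT B =====
def count_block_comment_from_single_comments_alt (line_num_single_comments : List Int) : Int × Int :=
  let xs := line_num_single_comments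
  if xs = [] then (0, 0)
  else
    -- gaps[i] = True marks a break between xs[i] and xs[i+1]
    let gaps := (xs.zip (xs.drop 1)).map (fun p => decide (p.2 - p.1 ≠ 1))
    let starts := true :: gaps
    let ends := gaps ++ [true]
    let single_comments : Int := ((starts.zip ends).filter (fun p => p.1 && p.2)).length
    let block_comments : Int := 1 + ((gaps.filter (fun b => b)).length : Int) - single_comments
    (block_comments, single_comments)

-- ===== PRECONDITION & SPEC =====
-- On the empty list A reports one single comment and zero block comments, a phantom count for input
-- with no comment lines; B reports zero of each, the intended counts.
def D_count_block_comment_from_single_comments (line_num_single_comments : List Int) : Prop :=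
  line_num_single_comments = []
instance (line_num_single_comments : List Int) : Decidable (D_count_block_comment_from_single_comments line_num_single_comments) := by unfold D_count_block_comment_from_single_comments; infer_instance

def Spec_count_block_comment_from_single_comments (line_num_single_comments : List Int) (out : Int × Int) : Prop := ¬ D_count_block_comment_from_single_comments line_num_single_comments → out = count_block_comment_from_single_comments_alt line_num_single_comments
instance (line_num_single_comments : List Int) (out : Int × Int) : Decidable (Spec_count_block_comment_from_single_comments line_num_single_comments out) := by unfold Spec_count_block_comment_from_single_comments; infer_instance

def pvDiffWitness_count_block_comment_from_single_comments : List Int := []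
def pvDiffWitnessOut_count_block_comment_from_single_comments : (Int × Int) × (Int × Int) := ((0, 1), (0, 0))

-- ===== CLAIM (what is proved, stated in full; the proofs are below) =====
def Claim_unchanged_count_block_comment_from_single_comments : Prop := ∀ (line_num_single_comments : List Int), Dom_count_block_comment_from_single_comments line_num_single_comments → Spec_count_block_comment_from_single_comments line_num_single_comments (count_block_comment_from_single_comments line_num_single_comments)
def Claim_changed_count_block_comment_from_single_comments : Prop := Dom_count_block_comment_from_single_comments (pvDiffWitness_count_block_comment_from_single_comments) ∧ D_count_block_comment_from_single_comments (pvDiffWitness_count_block_comment_from_single_comments) ∧ count_block_comment_from_single_comments (pvDiffWitness_count_block_comment_from_single_comments) = pvDiffWitnessOut_count_block_comment_from_single_comments.1 ∧ count_block_comment_from_single_comments_alt (pvDiffWitness_count_block_comment_from_single_comments) = pvDiffWitnessOut_count_block_comment_from_single_comments.2 ∧ pvDiffWitnessOut_count_block_comment_from_single_comments.1 ≠ pvDiffWitnessOut_count_block_comment_from_single_comments.2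
def Claim_exact_count_block_comment_from_single_comments : Prop := ∀ (line_num_single_comments : List Int), Dom_count_block_comment_from_single_comments line_num_single_comments → D_count_block_comment_from_single_comments line_num_single_comments → count_block_comment_from_single_comments line_num_single_comments ≠ count_block_comment_from_single_comments_alt line_num_single_comments

-- ===== LEMMAS AND PROOFS =====

-- A's loop state reduced to the gap booleans: (consecutive_comments, block_comments, single_comments)
def stepG (st : Int × Int × Int) (g : Bool) : Int × Int × Int :=
  if g = false then (st.1 + 1, st.2.1, st.2.2)
  else if st.1 > 1 then (1, st.2.1 + 1, st.2.2)
  else (st.1, st.2.1, st.2.2 + 1)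

-- number of true entries, as Int
def cntT : List Bool → Int
  | [] => 0
  | x :: g => (if x then 1 else 0) + cntT g

-- number of singletons determined by the gap list, current element starting a run iff `a`
def sngT : Bool → List Bool → Int
  | a, [] => if a then 1 else 0
  | a, x :: g => (if a && x then 1 else 0) + sngT x g

theorem cntT_eq (g : List Bool) : cntT g = ((g.filter (fun b => b)).length : Int) := by
  induction g with
  | nil => simp [cntT]
  | cons x t ih => cases x <;> (simp [cntT, ih]; try omega)

theorem sngT_eq (a : Bool) (g : List Bool) :
    ((((a :: g).zip (g ++ [true])).filter (fun p => p.1 && p.2)).length : Int) = sngT a g := by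
  induction g generalizing a with
  | nil => cases a <;> simp [sngT]
  | cons x t ih =>
    have := ih x
    cases a <;> cases x <;> simp [sngT, List.zip] at * <;> omega

theorem foldA_eq (l : List Int) (prev c b s : Int) :
    (l.foldl pyLoopStep (prev, c, b, s)).2 =
      (((prev :: l).zip l).map (fun p : Int × Int => decide (p.2 - p.1 ≠ 1))).foldl stepG (c, b, s) := by
  induction l generalizing prev c b s with
  | nil => rfl
  | cons x t ih =>
    simp only [List.zip_cons_cons, List.map_cons, List.foldl_cons]
    by_cases h : x - prev = 1
    · simpa [pyLoopStep, stepG, h] using ih x (c + 1) b s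
    · by_cases hc : c > 1
      · simpa [pyLoopStep, stepG, h, hc] using ih x 1 (b + 1) s
      · simpa [pyLoopStep, stepG, h, hc] using ih x c b (s + 1)

theorem foldG_fin (g : List Bool) (c b s : Int) (hc : 1 ≤ c) :
    (let r := g.foldl stepG (c, b, s)
     if r.1 > 1 then (r.2.1 + 1, r.2.2) else (r.2.1, r.2.2 + 1)) =
      ((b + 1 + cntT g - sngT (decide (c = 1)) g, s + sngT (decide (c = 1)) g) : Int × Int) := by
  induction g generalizing c b s with
  | nil =>
    by_cases h : c > 1
    · have : ¬ c = 1 := by omega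
      simp [sngT, cntT, h, this]
    · have : c = 1 := by omega
      simp [sngT, cntT, h, this]
  | cons x t ih =>
    cases x with
    | false =>
      have h1 : (1 : Int) ≤ c + 1 := by omega
      have hne : ¬ (c + 1 = 1) := by omega
      have := ih (c + 1) b s h1
      simp only [List.foldl_cons, stepG] at *
      simp [sngT, cntT, hne] at this ⊢
      rw [this]
    | true =>
      by_cases h : c > 1
      · have hne : ¬ (c = 1) := by omega
        have := ih 1 (b + 1) s (by omega)
        simp only [List.foldl_cons, stepG] at *
        simp [sngT, cntT, h, hne] at this ⊢
        rw [this]; simp only [Prod.mk.injEq]; constructor <;> first | trivial | ring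
      · have heq : c = 1 := by omega
        have := ih c b (s + 1) hc
        simp only [List.foldl_cons, stepG] at *
        simp [sngT, cntT, heq] at this ⊢
        rw [this]; simp only [Prod.mk.injEq]; constructor <;> first | trivial | ring

-- ===== VERDICT (by name: the statement is the Claim_ definition above) =====
theorem count_block_comment_from_single_comments_spec : Claim_unchanged_count_block_comment_from_single_comments := by
  intro xs _ hD
  match xs with
  | [] => exact absurd rfl hD
  | x :: rest =>
    show (let previous_number := (x :: rest).headD 0
          let st := ((x :: rest).drop 1).foldl pyLoopStep (previous_number, 1, 0, 0)
          if st.2.1 > 1 then (st.2.2.1 + 1, st.2.2.2) else (st.2.2.1, st.2.2.2 + 1)) =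
        count_block_comment_from_single_comments_alt (x :: rest)
    have hA := foldA_eq rest x 1 0 0
    have hG := foldG_fin (((x :: rest).zip rest).map (fun p : Int × Int => decide (p.2 - p.1 ≠ 1)))
      1 0 0 (by omega)
    have hS := sngT_eq true (((x :: rest).zip rest).map (fun p : Int × Int => decide (p.2 - p.1 ≠ 1)))
    simp only [count_block_comment_from_single_comments_alt, List.headD, List.drop_one,
      List.tail_cons, if_neg (List.cons_ne_nil x rest)]
    rw [hA] at *
    simp only [decide_true] at hG ⊢
    rw [hG]
    rw [cntT_eq, ← hS]
    simp only [Prod.mk.injEq]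
    omega

theorem count_block_comment_from_single_comments_changed : Claim_changed_count_block_comment_from_single_comments := by
  unfold Claim_changed_count_block_comment_from_single_comments; decide

theorem count_block_comment_from_single_comments_tight : Claim_exact_count_block_comment_from_single_comments := by
  intro xs _ hD
  subst hD
  decide
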